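-- pv_equiv track=rewrite | github.com/simonwangao/Pickle_Gomoku_Agent | board.py | CheckFlex4
-- ===== SOURCE A (Python) =====
-- flex4 = 6           # 活四
--
-- block4 = 5          # 冲四
--
-- Empty = 0
--
-- def CheckFlex4(line):
--     # 同线双四特判
--     five = 0
--     role = line[4]  # real number
--     for i in range(9):
--         if line[i] == Empty:
--             count = 0
--             # first round
--             j = i - 1
--             while j >= 0 and line[j] == role:
--                 count += 1
--                 j -= 1
--             # second round
--             j = i + 1
--             while j <= 8 and line[j] == role:
--                 count += 1
--                 j += 1
--             if count >= 4:
--                 five += 1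
--     if five >= 2:
--         return flex4
--     else:
--         return block4
-- ===== SOURCE B (Python) =====
-- flex4 = 6           # 活四
--
-- block4 = 5          # 冲四
--
-- Empty = 0
--
-- def CheckFlex4(line):
--     # Precompute run lengths in two linear passes instead of per-empty-cell inward scans.
--     role = line[4]
--     rleft = []          # rleft[i] = length of role-run ending at i (within indices 0..8)
--     run = 0
--     for i in range(9):
--         run = run + 1 if line[i] == role else 0
--         rleft.append(run)
--     rright = []         # rright[i] = length of role-run starting at i (within indices 0..8)
--     run = 0
--     for i in range(8, -1, -1):
--         run = run + 1 if line[i] == role else 0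
--         rright.append(run)
--     rright.reverse()
--     fours = 0
--     for i in range(9):
--         if line[i] == Empty:
--             left = rleft[i - 1] if i > 0 else 0
--             right = rright[i + 1] if i < 8 else 0
--             if left + right >= 4:
--                 fours += 1
--     return flex4 if fours >= 2 else block4
-- ===== Notes on version B (the rewrite author's own statement) =====
-- stated objective: alternative
-- what changed: Replaces A's per-empty-cell inward while-loop scans with two precomputed run-length tables (runs ending at i, runs starting at i) built in linear passes plus one table-lookup scan.
import Mathlib
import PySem

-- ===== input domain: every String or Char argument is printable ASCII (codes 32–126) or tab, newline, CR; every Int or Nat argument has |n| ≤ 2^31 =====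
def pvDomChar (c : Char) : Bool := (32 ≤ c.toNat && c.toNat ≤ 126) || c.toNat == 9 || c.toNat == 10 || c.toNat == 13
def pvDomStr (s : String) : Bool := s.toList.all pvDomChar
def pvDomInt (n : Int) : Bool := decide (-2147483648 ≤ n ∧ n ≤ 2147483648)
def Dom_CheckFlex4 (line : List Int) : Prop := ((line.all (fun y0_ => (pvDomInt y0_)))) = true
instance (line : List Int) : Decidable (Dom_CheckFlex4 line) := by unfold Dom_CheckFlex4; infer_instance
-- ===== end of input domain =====

-- B replaces A's per-empty-cell inward while-loops by two precomputed run-length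
-- tables plus one scan (a different decomposition of the same exact computation).

-- ===== PORT A =====
-- 'while j >= 0 and line[j] == role: count += 1; j -= 1'  (indices are in range under Pre_, so pyGetD is exact)
def pvALoop1 (line : List Int) (role : Int) (j : Int) (count : Int) : Int :=
  if h : 0 ≤ j ∧ PySem.List.pyGetD line j 0 = role then
    pvALoop1 line role (j - 1) (count + 1)
  else count
termination_by (j + 1).toNat
decreasing_by omega

-- 'while j <= 8 and line[j] == role: count += 1; j += 1'
def pvALoop2 (line : List Int) (role : Int) (j : Int) (count : Int) : Int :=
  if h : j ≤ 8 ∧ PySem.List.pyGetD line j 0 = role then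
    pvALoop2 line role (j + 1) (count + 1)
  else count
termination_by (9 - j).toNat
decreasing_by omega

def CheckFlex4 (line : List Int) : Int :=
  let role := PySem.List.pyGetD line 4 0
  let five := (PySem.List.pyRange 0 9 1).foldl (fun five i =>
    if PySem.List.pyGetD line i 0 = 0 then
      let count := pvALoop2 line role (i + 1) (pvALoop1 line role (i - 1) 0)
      if count ≥ 4 then five + 1 else five
    else five) 0
  if five ≥ 2 then 6 else 5

-- ===== PORT B =====
def CheckFlex4_alt (line : List Int) : Int :=
  let role := PySem.List.pyGetD line 4 0
  let rleft := ((PySem.List.pyRange 0 9 1).foldl (fun (s : List Int × Int) i =>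
      let run := if PySem.List.pyGetD line i 0 = role then s.2 + 1 else 0
      (s.1 ++ [run], run)) ([], 0)).1
  let rright := (((PySem.List.pyRange 8 (-1) (-1)).foldl (fun (s : List Int × Int) i =>
      let run := if PySem.List.pyGetD line i 0 = role then s.2 + 1 else 0
      (s.1 ++ [run], run)) ([], 0)).1).reverse
  let fours := (PySem.List.pyRange 0 9 1).foldl (fun fours i =>
    if PySem.List.pyGetD line i 0 = 0 then
      let left := if i > 0 then PySem.List.pyGetD rleft (i - 1) 0 else 0
      let right := if i < 8 then PySem.List.pyGetD rright (i + 1) 0 else 0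
      if left + right ≥ 4 then fours + 1 else fours
    else fours) 0
  if fours ≥ 2 then 6 else 5

-- ===== PRECONDITION & SPEC =====
-- Python A indexes the first nine cells (and the centre), so it raises IndexError iff the line has fewer than 9 elements; Pre_ excludes exactly those crashing inputs.
def Pre_CheckFlex4 (line : List Int) : Prop := 9 ≤ line.length
instance (line : List Int) : Decidable (Pre_CheckFlex4 line) := by unfold Pre_CheckFlex4; infer_instance
def pvWitness_CheckFlex4 : List Int := [0, 1, 1, 0, 1, 1, 0, 2, 0]

def Spec_CheckFlex4 (line : List Int) (out : Int) : Prop := out = CheckFlex4_alt line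
instance (line : List Int) (out : Int) : Decidable (Spec_CheckFlex4 line out) := by unfold Spec_CheckFlex4; infer_instance

-- ===== CLAIM (what is proved, stated in full; the proofs are below) =====
def Claim_equal_CheckFlex4 : Prop := ∀ (line : List Int), Dom_CheckFlex4 line → Pre_CheckFlex4 line → Spec_CheckFlex4 line (CheckFlex4 line)

-- ===== LEMMAS AND PROOFS =====

theorem pvALoop1_add (line : List Int) (role : Int) (j c : Int) :
    pvALoop1 line role j c = c + pvALoop1 line role j 0 := by
  have H : ∀ (n : Nat) (j c : Int), (j + 1).toNat ≤ n →
      pvALoop1 line role j c = c + pvALoop1 line role j 0 := by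
    intro n
    induction n with
    | zero =>
      intro j c h
      conv_lhs => rw [pvALoop1]
      conv_rhs => rw [pvALoop1]
      split_ifs with h1
      · omega
      · omega
    | succ n ih =>
      intro j c h
      conv_lhs => rw [pvALoop1]
      conv_rhs => rw [pvALoop1]
      split_ifs with h1
      · rw [ih (j - 1) (c + 1) (by omega), ih (j - 1) (0 + 1) (by omega)]; ring
      · omega
  exact H (j + 1).toNat j c (le_refl _)

theorem pvALoop2_add (line : List Int) (role : Int) (j c : Int) :
    pvALoop2 line role j c = c + pvALoop2 line role j 0 := by
  have H : ∀ (n : Nat) (j c : Int), (9 - j).toNat ≤ n →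
      pvALoop2 line role j c = c + pvALoop2 line role j 0 := by
    intro n
    induction n with
    | zero =>
      intro j c h
      conv_lhs => rw [pvALoop2]
      conv_rhs => rw [pvALoop2]
      split_ifs with h1
      · omega
      · omega
    | succ n ih =>
      intro j c h
      conv_lhs => rw [pvALoop2]
      conv_rhs => rw [pvALoop2]
      split_ifs with h1
      · rw [ih (j + 1) (c + 1) (by omega), ih (j + 1) (0 + 1) (by omega)]; ring
      · omega
  exact H (9 - j).toNat j c (le_refl _)

theorem f_step (line : List Int) (role : Int) (j : Int) :
    pvALoop1 line role j 0 =
      if 0 ≤ j ∧ PySem.List.pyGetD line j 0 = role then pvALoop1 line role (j - 1) 0 + 1 else 0 := by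
  rw [pvALoop1]
  split_ifs with h
  · rw [pvALoop1_add]; ring
  · rfl

theorem f_neg (line : List Int) (role : Int) (j : Int) (h : j < 0) :
    pvALoop1 line role j 0 = 0 := by
  rw [f_step]
  split_ifs with h1
  · omega
  · rfl

theorem fR_step (line : List Int) (role : Int) (j : Int) :
    pvALoop2 line role j 0 =
      if j ≤ 8 ∧ PySem.List.pyGetD line j 0 = role then pvALoop2 line role (j + 1) 0 + 1 else 0 := by
  rw [pvALoop2]
  split_ifs with h
  · rw [pvALoop2_add]; ring
  · rfl

theorem fR_gt (line : List Int) (role : Int) (j : Int) (h : 8 < j) :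
    pvALoop2 line role j 0 = 0 := by
  rw [fR_step]
  split_ifs with h1
  · omega
  · rfl

theorem chainL (line : List Int) (role : Int) :
    ∀ (n : Nat) (a : Int) (acc : List Int), 0 ≤ a →
      List.foldl (fun (s : List Int × Int) i =>
          let run := if PySem.List.pyGetD line i 0 = role then s.2 + 1 else 0
          (s.1 ++ [run], run)) (acc, pvALoop1 line role (a - 1) 0)
        (PySem.List.pyRange a (a + (n : Int)) 1)
      = (acc ++ (PySem.List.pyRange a (a + (n : Int)) 1).map (fun i => pvALoop1 line role i 0),
         pvALoop1 line role (a + (n : Int) - 1) 0) := by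
  intro n
  induction n with
  | zero =>
    intro a acc ha
    rw [PySem.List.pyRange_one_eq_nil (by omega)]
    simp
  | succ n ih =>
    intro a acc ha
    rw [PySem.List.pyRange_one_cons (by omega : a < a + ((n + 1 : Nat) : Int))]
    rw [List.foldl_cons, List.map_cons]
    have hrun : (if PySem.List.pyGetD line a 0 = role then pvALoop1 line role (a - 1) 0 + 1 else 0)
        = pvALoop1 line role a 0 := by
      rw [f_step line role a]
      by_cases h1 : PySem.List.pyGetD line a 0 = role
      · simp [h1, ha]
      · simp [h1]
    show List.foldl _ (acc ++ [_], _) _ = _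
    rw [hrun]
    have h2 : a + ((n + 1 : Nat) : Int) = (a + 1) + (n : Int) := by push_cast; ring
    rw [h2]
    have h3 : pvALoop1 line role a 0 = pvALoop1 line role ((a + 1) - 1) 0 := by norm_num
    rw [h3, ih (a + 1) (acc ++ [pvALoop1 line role ((a + 1) - 1) 0]) (by omega)]
    simp only [List.append_assoc, List.singleton_append]

theorem chainR (line : List Int) (role : Int) :
    ∀ (n : Nat) (b : Int) (acc : List Int), b ≤ 8 →
      List.foldl (fun (s : List Int × Int) i =>
          let run := if PySem.List.pyGetD line i 0 = role then s.2 + 1 else 0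
          (s.1 ++ [run], run)) (acc, pvALoop2 line role (b + 1) 0)
        ((List.range n).map (fun (k : Nat) => b - (k : Int)))
      = (acc ++ ((List.range n).map (fun (k : Nat) => b - (k : Int))).map (fun i => pvALoop2 line role i 0),
         pvALoop2 line role (b - (n : Int) + 1) 0) := by
  intro n
  induction n with
  | zero => intro b acc hb; simp
  | succ n ih =>
    intro b acc hb
    have hlist : (List.range (n + 1)).map (fun (k : Nat) => b - (k : Int))
        = b :: (List.range n).map (fun (k : Nat) => (b - 1) - (k : Int)) := by
      have hc : ∀ k : Nat, b - ((k + 1 : Nat) : Int) = (b - 1) - (k : Int) := by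
        intro k; push_cast; ring
      simp only [List.range_succ_eq_map, List.map_cons, List.map_map, Nat.cast_zero, sub_zero]
      congr 1
      apply List.map_congr_left
      intro a _
      simp only [Function.comp_apply]
      push_cast
      ring
    rw [hlist, List.foldl_cons]
    have hrun : (if PySem.List.pyGetD line b 0 = role then pvALoop2 line role (b + 1) 0 + 1 else 0)
        = pvALoop2 line role b 0 := by
      rw [fR_step line role b]
      by_cases h1 : PySem.List.pyGetD line b 0 = role
      · simp [h1, hb]
      · simp [h1]
    show List.foldl _ (acc ++ [_], _) _ = _
    rw [hrun]
    have h3 : pvALoop2 line role b 0 = pvALoop2 line role ((b - 1) + 1) 0 := by norm_num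
    rw [h3, ih (b - 1) (acc ++ [pvALoop2 line role ((b - 1) + 1) 0]) (by omega)]
    rw [List.map_cons, ← h3]
    have h4 : b - 1 - (n : Int) + 1 = b - ((n + 1 : Nat) : Int) + 1 := by push_cast; ring
    rw [h4]
    simp only [List.append_assoc, List.singleton_append]

theorem pvDown_eq : PySem.List.pyRange 8 (-1) (-1) = (List.range 9).map (fun (k : Nat) => 8 - (k : Int)) := by
  decide

theorem pvRev (h : Int → Int) :
    ((List.range 9).map (h ∘ fun (k : Nat) => 8 - (k : Int))).reverse
      = (PySem.List.pyRange 0 9 1).map h := by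
  apply List.ext_getElem
  · simp [PySem.List.length_pyRange_one]
  · intro i h1 h2
    simp only [List.length_reverse, List.length_map, List.length_range] at h1
    simp only [List.getElem_reverse, List.getElem_map, List.getElem_range, List.length_map,
      List.length_range, Function.comp_apply, PySem.List.getElem_pyRange_one]
    congr 1
    omega

-- ===== VERDICT (by name: the statement is the Claim_ definition above) =====
theorem CheckFlex4_spec : Claim_equal_CheckFlex4 := by
  intro line _ _
  unfold Spec_CheckFlex4 CheckFlex4 CheckFlex4_alt
  simp only []
  set role := PySem.List.pyGetD line 4 0 with hrole
  have h1 := chainL line role 9 0 [] (le_refl 0)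
  rw [f_neg line role (0 - 1) (by norm_num)] at h1
  norm_num at h1
  have h2 := chainR line role 9 8 [] (by norm_num)
  rw [fR_gt line role (8 + 1) (by norm_num)] at h2
  norm_num at h2
  rw [pvDown_eq, h2, h1]
  dsimp only
  rw [pvRev (fun i => pvALoop2 line role i 0)]
  suffices hfold :
      (PySem.List.pyRange 0 9 1).foldl (fun five i =>
        if PySem.List.pyGetD line i 0 = 0 then
          let count := pvALoop2 line role (i + 1) (pvALoop1 line role (i - 1) 0)
          if count ≥ 4 then five + 1 else five
        else five) 0
      = (PySem.List.pyRange 0 9 1).foldl (fun fours i =>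
        if PySem.List.pyGetD line i 0 = 0 then
          let left := if i > 0 then
            PySem.List.pyGetD ((PySem.List.pyRange 0 9 1).map (fun i => pvALoop1 line role i 0)) (i - 1) 0 else 0
          let right := if i < 8 then
            PySem.List.pyGetD ((PySem.List.pyRange 0 9 1).map (fun i => pvALoop2 line role i 0)) (i + 1) 0 else 0
          if left + right ≥ 4 then fours + 1 else fours
        else fours) 0 by
    rw [hfold]
  apply PySem.List.foldl_congr_mem
  intro acc x hx
  rw [PySem.List.mem_pyRange_one] at hx
  simp only []
  have hcount : pvALoop2 line role (x + 1) (pvALoop1 line role (x - 1) 0)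
      = pvALoop1 line role (x - 1) 0 + pvALoop2 line role (x + 1) 0 := pvALoop2_add line role _ _
  have hleft : (if x > 0 then
      PySem.List.pyGetD ((PySem.List.pyRange 0 9 1).map (fun i => pvALoop1 line role i 0)) (x - 1) 0 else 0)
      = pvALoop1 line role (x - 1) 0 := by
    split_ifs with h
    · exact PySem.List.pyGetD_map_pyRange_of_nonneg _ 9 (x - 1) 0 (by omega) (by omega)
    · exact (f_neg line role (x - 1) (by omega)).symm
  have hright : (if x < 8 then
      PySem.List.pyGetD ((PySem.List.pyRange 0 9 1).map (fun i => pvALoop2 line role i 0)) (x + 1) 0 else 0)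
      = pvALoop2 line role (x + 1) 0 := by
    split_ifs with h
    · exact PySem.List.pyGetD_map_pyRange_of_nonneg _ 9 (x + 1) 0 (by omega) (by omega)
    · exact (fR_gt line role (x + 1) (by omega)).symm
  rw [hcount, hleft, hright]
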